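-- pv_equiv track=rewrite | github.com/facebookresearch/pytext | pytext/utils/data.py | merge_token_labels_by_bio
-- ===== SOURCE A (Python) =====
-- class Slot:
--     B_LABEL_PREFIX = "B-"
--     I_LABEL_PREFIX = "I-"
--     NO_LABEL_SLOT = "NoLabel"
--
--     def __init__(self, label: str, start: int, end: int) -> None:
--         self.label = label
--         self.start = start
--         self.end = end
--
--     def token_overlap(self, token_start, token_end):
--         start = min(token_end, max(token_start, self.start))
--         end = min(token_end, max(token_start, self.end))
--         return end - start
--
--     def token_label(self, use_bio_labels, token_start, token_end):
--         token_label = self.NO_LABEL_SLOT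
--         token_overlap = self.token_overlap(token_start, token_end)
--
--         if use_bio_labels:
--             if token_start == self.start and token_overlap:
--                 token_label = self.b_label_name
--             elif token_start > self.start and token_overlap:
--                 token_label = self.i_label_name
--         else:
--             if token_overlap:
--                 token_label = self.label
--         return token_label
--
--     @property
--     def b_label_name(self):
--         return "{}{}".format(self.B_LABEL_PREFIX, self.label)
--
--     @property
--     def i_label_name(self):
--         return "{}{}".format(self.I_LABEL_PREFIX, self.label)
--
--     def __repr__(self):
--         return "{}:{}:{}".format(self.start, self.end, self.label)
--
-- def strip_bio_prefix(label):
--     if label.startswith(Slot.B_LABEL_PREFIX) or label.startswith(Slot.I_LABEL_PREFIX):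
--         label = label[len(Slot.B_LABEL_PREFIX) :]
--     return label
--
-- def merge_token_labels_by_bio(token_ranges, labels):
--     summary_list = []
--     previous_B = None
--     for i, label in enumerate(labels):
--         # Take action only if the prefix is not i
--         if not label.startswith(Slot.I_LABEL_PREFIX):
--             # Label the previous chunk
--             if previous_B is not None:
--                 begin = token_ranges[previous_B][0]
--                 end = token_ranges[i - 1][1]
--                 summary_list.append(
--                     ":".join([str(begin), str(end), strip_bio_prefix(labels[i - 1])])
--                 )
--             # Assign the begin location of new chunk
--             if label.startswith(Slot.B_LABEL_PREFIX):
--                 previous_B = i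
--             else:  # label == Slot.NO_LABEL_SLOT
--                 previous_B = None
--
--     # Take last token into account
--     if previous_B is not None:
--         begin = token_ranges[previous_B][0]
--         end = token_ranges[-1][1]
--         summary_list.append(
--             ":".join([str(begin), str(end), strip_bio_prefix(labels[-1])])
--         )
--
--     return summary_list
-- ===== SOURCE B (Python) =====
-- def strip_bio_prefix(label):
--     if label.startswith("B-") or label.startswith("I-"):
--         label = label[2:]
--     return label
--
--
-- def merge_token_labels_by_bio(token_ranges, labels):
--     # Forward-grouping scan over the zipped (range, label) pairs: find each
--     # "B-" label, absorb its run of following "I-" labels, emit the chunk.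
--     out = []
--     pairs = list(zip(token_ranges, labels))
--     n = len(pairs)
--     i = 0
--     while i < n:
--         rng, lab = pairs[i]
--         if not lab.startswith("B-"):
--             i += 1
--             continue
--         last_rng, last_lab = rng, lab
--         j = i + 1
--         while j < n and pairs[j][1].startswith("I-"):
--             last_rng, last_lab = pairs[j]
--             j += 1
--         out.append(":".join([str(rng[0]), str(last_rng[1]), strip_bio_prefix(last_lab)]))
--         i = j
--     return out
-- ===== Notes on version B (the rewrite author's own statement) =====
-- stated objective: alternative
-- what changed: Replaced A's deferred-close state machine (previous_B index carried across the enumerate loop, flush on the next non-I label and once more after the loop) by a forward-grouping scan over the zipped (range, label) pairs that finds each 'B-' label, absorbs its run of following 'I-' labels with an inner scan, and emits the chunk immediately; same O(n), measured constant-factor faster on the timing inputs (cheaper per-element work: no enumerate tuples, no class-attribute prefix constants, boundary logic only at chunk starts).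
-- outside the precondition, e.g. on merge_token_labels_by_bio([(0, 1), (2, 3)], ['B-X']): A returns ['0:3:X'], B returns ['0:1:X']; on merge_token_labels_by_bio([], ['B-X']): A raises IndexError, B returns []
import Mathlib
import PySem

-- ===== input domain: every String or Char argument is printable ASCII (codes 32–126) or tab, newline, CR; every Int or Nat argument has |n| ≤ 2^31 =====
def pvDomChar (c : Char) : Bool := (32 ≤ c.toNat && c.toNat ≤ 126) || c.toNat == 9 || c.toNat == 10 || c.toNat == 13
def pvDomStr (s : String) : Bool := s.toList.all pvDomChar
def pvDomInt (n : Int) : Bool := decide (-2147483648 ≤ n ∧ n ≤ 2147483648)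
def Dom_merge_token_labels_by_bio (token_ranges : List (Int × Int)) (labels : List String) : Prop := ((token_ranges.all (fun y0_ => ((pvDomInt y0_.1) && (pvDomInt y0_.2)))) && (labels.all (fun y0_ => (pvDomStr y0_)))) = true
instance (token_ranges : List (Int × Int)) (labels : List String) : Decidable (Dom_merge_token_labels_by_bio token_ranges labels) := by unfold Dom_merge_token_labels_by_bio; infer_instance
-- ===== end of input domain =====

-- B replaces A's deferred-close previous_B state machine by a forward-grouping scan over the
-- zipped (range, label) pairs (find each "B-", absorb its "I-" run, emit the chunk): same cost,
-- different decomposition (objective: alternative).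

-- ===== PORT A =====
-- shared helper (both Pythons build the chunk string the same way)
def strip_bio_prefix (label : String) : String :=
  if PySem.Str.startswith label "B-" || PySem.Str.startswith label "I-" then
    PySem.Str.slice label (some 2) none
  else label

def mkChunk (b e : Int) (lab : String) : String :=
  PySem.Str.join ":" [PySem.Int.toStr b, PySem.Int.toStr e, strip_bio_prefix lab]

-- one iteration of A's 'for i, label in enumerate(labels)' loop (state = (summary_list, previous_B));
-- pyGetD's default is only reached where Python would raise IndexError (outside Pre_)
def AStep (token_ranges : List (Int × Int)) (labels : List String)
    (st : List String × Option Int) (p : Int × String) : List String × Option Int :=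
  if !(PySem.Str.startswith p.2 "I-") then
    let s1 : List String :=
      match st.2 with
      | some pB =>
          st.1 ++ [mkChunk (PySem.List.pyGetD token_ranges pB (0, 0)).1
                           (PySem.List.pyGetD token_ranges (p.1 - 1) (0, 0)).2
                           (PySem.List.pyGetD labels (p.1 - 1) "")]
      | none => st.1
    if PySem.Str.startswith p.2 "B-" then (s1, some p.1) else (s1, none)
  else st

def merge_token_labels_by_bio (token_ranges : List (Int × Int)) (labels : List String) : List String :=
  let st := (PySem.List.enumerate labels 0).foldl (AStep token_ranges labels) ([], none)
  match st.2 with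
  | some pB =>
      st.1 ++ [mkChunk (PySem.List.pyGetD token_ranges pB (0, 0)).1
                       (PySem.List.pyGetD token_ranges (-1) (0, 0)).2
                       (PySem.List.pyGetD labels (-1) "")]
  | none => st.1

-- ===== PORT B =====
-- B's inner while-loop: pop leading "I-" pairs, tracking the last pair of the chunk
def takeIRun (pairs : List ((Int × Int) × String)) (last : (Int × Int) × String) :
    ((Int × Int) × String) × List ((Int × Int) × String) :=
  match pairs with
  | [] => (last, [])
  | p :: rest => if PySem.Str.startswith p.2 "I-" then takeIRun rest p else (last, p :: rest)

theorem takeIRun_length_le (pairs : List ((Int × Int) × String)) (last : (Int × Int) × String) :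
    (takeIRun pairs last).2.length ≤ pairs.length := by
  induction pairs generalizing last with
  | nil => simp [takeIRun]
  | cons p rest ih =>
    simp only [takeIRun]
    split
    · exact Nat.le_succ_of_le (ih p)
    · simp

-- B's outer while-loop over the remaining pairs
def goB : List ((Int × Int) × String) → List String
  | [] => []
  | p :: rest =>
    if !(PySem.Str.startswith p.2 "B-") then goB rest
    else
      mkChunk p.1.1 (takeIRun rest p).1.1.2 (takeIRun rest p).1.2 :: goB (takeIRun rest p).2
termination_by pairs => pairs.length
decreasing_by
  · simp
  · exact Nat.lt_succ_of_le (takeIRun_length_le rest p)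

def merge_token_labels_by_bio_alt (token_ranges : List (Int × Int)) (labels : List String) : List String :=
  goB (token_ranges.zip labels)

-- ===== PRECONDITION & SPEC =====
-- Pre_ excludes inputs where some label starts with "B-" but len(token_ranges) ≠ len(labels):
-- there A either raises IndexError (token_ranges too short) or its final flush reads
-- token_ranges[-1], a range beyond the labelled tokens — an artefact of A's indexing; the
-- length-mismatch shape also drops some inputs on which A happens to return the same value as B.
def Pre_merge_token_labels_by_bio (token_ranges : List (Int × Int)) (labels : List String) : Prop :=
  token_ranges.length = labels.length ∨ ∀ l ∈ labels, PySem.Str.startswith l "B-" = false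
instance (token_ranges : List (Int × Int)) (labels : List String) : Decidable (Pre_merge_token_labels_by_bio token_ranges labels) := by unfold Pre_merge_token_labels_by_bio; infer_instance

def pvWitness_merge_token_labels_by_bio : (List (Int × Int)) × List String :=
  ([(0, 2), (3, 5), (6, 9)], ["B-X", "I-X", "NoLabel"])

def Spec_merge_token_labels_by_bio (token_ranges : List (Int × Int)) (labels : List String) (out : List String) : Prop := out = merge_token_labels_by_bio_alt token_ranges labels
instance (token_ranges : List (Int × Int)) (labels : List String) (out : List String) : Decidable (Spec_merge_token_labels_by_bio token_ranges labels out) := by unfold Spec_merge_token_labels_by_bio; infer_instance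

-- ===== CLAIM (what is proved, stated in full; the proofs are below) =====
def Claim_equal_merge_token_labels_by_bio : Prop := ∀ (token_ranges : List (Int × Int)) (labels : List String), Dom_merge_token_labels_by_bio token_ranges labels → Pre_merge_token_labels_by_bio token_ranges labels → Spec_merge_token_labels_by_bio token_ranges labels (merge_token_labels_by_bio token_ranges labels)

-- ===== LEMMAS AND PROOFS =====

-- A value-level reformulation of A's loop used only in the proof: the state additionally carries
-- the open chunk's begin coordinate and the previously seen (range, label) pair.
def stepV (st : List String × Option Int × ((Int × Int) × String)) (p : (Int × Int) × String) :
    List String × Option Int × ((Int × Int) × String) :=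
  if !(PySem.Str.startswith p.2 "I-") then
    let s1 : List String :=
      match st.2.1 with
      | some b => st.1 ++ [mkChunk b st.2.2.1.2 st.2.2.2]
      | none => st.1
    (s1, if PySem.Str.startswith p.2 "B-" then some p.1.1 else none, p)
  else (st.1, st.2.1, p)

def finV (st : List String × Option Int × ((Int × Int) × String)) : List String :=
  match st.2.1 with
  | some b => st.1 ++ [mkChunk b st.2.2.1.2 st.2.2.2]
  | none => st.1

def finA (token_ranges : List (Int × Int)) (labels : List String)
    (st : List String × Option Int) : List String :=
  match st.2 with
  | some pB =>
      st.1 ++ [mkChunk (PySem.List.pyGetD token_ranges pB (0, 0)).1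
                       (PySem.List.pyGetD token_ranges (-1) (0, 0)).2
                       (PySem.List.pyGetD labels (-1) "")]
  | none => st.1

-- the correspondence invariant between A's (summary, previous_B) and the value-level state
def ARel (TR : List (Int × Int)) (L : List String) (k : Nat) :
    Option Int → Option Int → ((Int × Int) × String) → Prop
  | none, none, _ => True
  | some pB, some b, prev =>
      1 ≤ k ∧ (∃ j : Nat, pB = (j : Int) ∧ j < k) ∧
      b = (PySem.List.pyGetD TR pB (0, 0)).1 ∧
      prev = (PySem.List.pyGetD TR ((k : Int) - 1) (0, 0), PySem.List.pyGetD L ((k : Int) - 1) "")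
  | _, _, _ => False

theorem pyGetD_nat {α : Type} (xs : List α) (k : Nat) (d : α) (h : k < xs.length) :
    PySem.List.pyGetD xs (k : Int) d = xs[k] := by
  rw [PySem.List.pyGetD_natCast]
  exact List.getD_eq_getElem xs d h

theorem pyGetD_last {α : Type} (xs : List α) (d : α) (h : xs ≠ []) :
    PySem.List.pyGetD xs (-1) d = PySem.List.pyGetD xs ((xs.length : Int) - 1) d := by
  have h1 : 1 ≤ xs.length := List.length_pos_iff.2 h
  have h2 : ((xs.length : Int) - 1) = ((xs.length - 1 : Nat) : Int) := by omega
  rw [PySem.List.pyGetD_neg_one (h := h), h2, PySem.List.pyGetD_natCast]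
  rw [List.getD_eq_getElem xs d (by omega), List.getLast_eq_getElem]

theorem bridge (TR : List (Int × Int)) (L : List String)
    (L' : List String) (k : Nat) (summary : List String) (stA : Option Int)
    (b? : Option Int) (prev : (Int × Int) × String)
    (hlen : TR.length = L.length) (hL' : L' = L.drop k) (hk : k ≤ L.length)
    (hrel : ARel TR L k stA b? prev) :
    finA TR L ((PySem.List.enumerate L' (k : Int)).foldl (AStep TR L) (summary, stA)) =
    finV (((TR.drop k).zip L').foldl stepV (summary, b?, prev)) := by
  induction L' generalizing k summary stA b? prev with
  | nil =>
    have hkE : k = L.length := by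
      have := congrArg List.length hL'
      simp [List.length_drop] at this
      omega
    rw [PySem.List.enumerate_nil]
    simp only [List.zip_nil_right, List.foldl_nil]
    cases stA with
    | none => cases b? with
      | none => simp [finA, finV]
      | some b => exact absurd hrel (by simp [ARel])
    | some pB => cases b? with
      | none => exact absurd hrel (by simp [ARel])
      | some b =>
        obtain ⟨hk1, ⟨j, hj, hjk⟩, hb, hprev⟩ := hrel
        have hTRne : TR ≠ [] := by
          intro hTRnil; rw [hTRnil] at hlen; simp at hlen; omega
        have hLne : L ≠ [] := by
          intro hLnil; rw [hLnil] at hkE; simp at hkE; omega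
        simp only [finA, finV, hb, hprev]
        rw [pyGetD_last TR (0, 0) hTRne, pyGetD_last L "" hLne, hlen, hkE]
  | cons l rest ih =>
    have hklt : k < L.length := by
      by_contra hge
      rw [List.drop_eq_nil_of_le (by omega)] at hL'
      simp at hL'
    have hdropL : L.drop k = L[k] :: L.drop (k + 1) := (List.getElem_cons_drop (by omega)).symm
    have hlrest : l = L[k] ∧ rest = L.drop (k + 1) := by
      rw [hdropL] at hL'
      exact ⟨(List.cons.injEq _ _ _ _ ▸ hL').1, (List.cons.injEq _ _ _ _ ▸ hL').2⟩
    obtain ⟨hl, hrest⟩ := hlrest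
    have hdropT : TR.drop k = TR[k]'(by omega) :: TR.drop (k + 1) :=
      (List.getElem_cons_drop (by omega)).symm
    have hcast : (k : Int) + 1 = ((k + 1 : Nat) : Int) := by push_cast; ring
    have hgetT : PySem.List.pyGetD TR (((k + 1 : Nat) : Int) - 1) (0, 0) = TR[k]'(by omega) := by
      have h9 : (((k + 1 : Nat) : Int) - 1) = (k : Int) := by push_cast; ring
      rw [h9]; exact pyGetD_nat TR k (0, 0) (by omega)
    have hgetL : PySem.List.pyGetD L (((k + 1 : Nat) : Int) - 1) "" = l := by
      have h9 : (((k + 1 : Nat) : Int) - 1) = (k : Int) := by push_cast; ring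
      rw [h9, pyGetD_nat L k "" (by omega), hl]
    rw [PySem.List.enumerate_cons, hdropT, List.zip_cons_cons, List.foldl_cons, List.foldl_cons,
      hcast]
    cases stA with
    | none =>
      cases b? with
      | some b => exact absurd hrel (by simp [ARel])
      | none =>
        by_cases hI : PySem.Str.startswith l "I-" = true
        · have hIc : PySem.Chars.startswith l.toList ['I', '-'] = true := by simpa using hI
          rw [show AStep TR L (summary, none) ((k : Int), l) = (summary, none) by
              simp [AStep, hIc],
            show stepV (summary, none, prev) (TR[k]'(by omega), l) =
              (summary, none, (TR[k]'(by omega), l)) by simp [stepV, hIc]]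
          exact ih (k + 1) summary none none _ hrest (by omega) trivial
        · have hIc : PySem.Chars.startswith l.toList ['I', '-'] = false := by simpa using hI
          by_cases hB : PySem.Str.startswith l "B-" = true
          · have hBc : PySem.Chars.startswith l.toList ['B', '-'] = true := by simpa using hB
            rw [show AStep TR L (summary, none) ((k : Int), l) = (summary, some (k : Int)) by
                simp [AStep, hIc, hBc],
              show stepV (summary, none, prev) (TR[k]'(by omega), l) =
                (summary, some (TR[k]'(by omega)).1, (TR[k]'(by omega), l)) by
                simp [stepV, hIc, hBc]]
            refine ih (k + 1) summary _ _ _ hrest (by omega) ?_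
            exact ⟨by omega, ⟨k, rfl, by omega⟩,
              by rw [pyGetD_nat TR k (0, 0) (by omega)], by rw [hgetT, hgetL]⟩
          · have hBc : PySem.Chars.startswith l.toList ['B', '-'] = false := by simpa using hB
            rw [show AStep TR L (summary, none) ((k : Int), l) = (summary, none) by
                simp [AStep, hIc, hBc],
              show stepV (summary, none, prev) (TR[k]'(by omega), l) =
                (summary, none, (TR[k]'(by omega), l)) by simp [stepV, hIc, hBc]]
            exact ih (k + 1) summary none none _ hrest (by omega) trivial
    | some pB =>
      cases b? with
      | none => exact absurd hrel (by simp [ARel])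
      | some b =>
        obtain ⟨hk1, ⟨j, hj, hjk⟩, hb, hprev⟩ := hrel
        subst hb hprev
        by_cases hI : PySem.Str.startswith l "I-" = true
        · have hIc : PySem.Chars.startswith l.toList ['I', '-'] = true := by simpa using hI
          rw [show AStep TR L (summary, some pB) ((k : Int), l) = (summary, some pB) by
              simp [AStep, hIc],
            show stepV (summary, some (PySem.List.pyGetD TR pB (0, 0)).1,
                (PySem.List.pyGetD TR ((k : Int) - 1) (0, 0), PySem.List.pyGetD L ((k : Int) - 1) ""))
                (TR[k]'(by omega), l) =
              (summary, some (PySem.List.pyGetD TR pB (0, 0)).1, (TR[k]'(by omega), l)) by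
              simp [stepV, hIc]]
          refine ih (k + 1) summary _ _ _ hrest (by omega) ?_
          exact ⟨by omega, ⟨j, hj, by omega⟩, rfl, by rw [hgetT, hgetL]⟩
        · have hIc : PySem.Chars.startswith l.toList ['I', '-'] = false := by simpa using hI
          by_cases hB : PySem.Str.startswith l "B-" = true
          · have hBc : PySem.Chars.startswith l.toList ['B', '-'] = true := by simpa using hB
            rw [show AStep TR L (summary, some pB) ((k : Int), l) =
                (summary ++ [mkChunk (PySem.List.pyGetD TR pB (0, 0)).1
                    (PySem.List.pyGetD TR ((k : Int) - 1) (0, 0)).2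
                    (PySem.List.pyGetD L ((k : Int) - 1) "")], some (k : Int)) by
                simp [AStep, hIc, hBc],
              show stepV (summary, some (PySem.List.pyGetD TR pB (0, 0)).1,
                  (PySem.List.pyGetD TR ((k : Int) - 1) (0, 0), PySem.List.pyGetD L ((k : Int) - 1) ""))
                  (TR[k]'(by omega), l) =
                (summary ++ [mkChunk (PySem.List.pyGetD TR pB (0, 0)).1
                    (PySem.List.pyGetD TR ((k : Int) - 1) (0, 0)).2
                    (PySem.List.pyGetD L ((k : Int) - 1) "")],
                 some (TR[k]'(by omega)).1, (TR[k]'(by omega), l)) by simp [stepV, hIc, hBc]]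
            refine ih (k + 1) _ _ _ _ hrest (by omega) ?_
            exact ⟨by omega, ⟨k, rfl, by omega⟩,
              by rw [pyGetD_nat TR k (0, 0) (by omega)], by rw [hgetT, hgetL]⟩
          · have hBc : PySem.Chars.startswith l.toList ['B', '-'] = false := by simpa using hB
            rw [show AStep TR L (summary, some pB) ((k : Int), l) =
                (summary ++ [mkChunk (PySem.List.pyGetD TR pB (0, 0)).1
                    (PySem.List.pyGetD TR ((k : Int) - 1) (0, 0)).2
                    (PySem.List.pyGetD L ((k : Int) - 1) "")], none) by
                simp [AStep, hIc, hBc],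
              show stepV (summary, some (PySem.List.pyGetD TR pB (0, 0)).1,
                  (PySem.List.pyGetD TR ((k : Int) - 1) (0, 0), PySem.List.pyGetD L ((k : Int) - 1) ""))
                  (TR[k]'(by omega), l) =
                (summary ++ [mkChunk (PySem.List.pyGetD TR pB (0, 0)).1
                    (PySem.List.pyGetD TR ((k : Int) - 1) (0, 0)).2
                    (PySem.List.pyGetD L ((k : Int) - 1) "")],
                 none, (TR[k]'(by omega), l)) by simp [stepV, hIc, hBc]]
            exact ih (k + 1) _ none none _ hrest (by omega) trivial

theorem not_B_of_I (l : String) (h : PySem.Str.startswith l "I-" = true) :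
    PySem.Str.startswith l "B-" = false := by
  by_contra hB
  rw [Bool.not_eq_false] at hB
  have h1 := (PySem.Chars.startswith_iff _ _).1 (by simpa using h)
  have h2 := (PySem.Chars.startswith_iff _ _).1 (by simpa using hB)
  rcases h1 with ⟨t1, e1⟩
  rcases h2 with ⟨t2, e2⟩
  rw [← e1] at e2
  simp at e2

theorem V_eq_goB (pairs : List ((Int × Int) × String)) (summary : List String)
    (o : Option Int) (prev : (Int × Int) × String) :
    finV (pairs.foldl stepV (summary, o, prev)) =
      summary ++ (match o with
        | none => goB pairs
        | some b => mkChunk b (takeIRun pairs prev).1.1.2 (takeIRun pairs prev).1.2 ::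
            goB (takeIRun pairs prev).2) := by
  induction pairs generalizing summary o prev with
  | nil =>
    cases o with
    | none => simp [finV, goB]
    | some b => simp [finV, takeIRun, goB]
  | cons p rest ih =>
    rw [List.foldl_cons]
    by_cases hI : PySem.Str.startswith p.2 "I-" = true
    · have hB := not_B_of_I p.2 hI
      have hIc : PySem.Chars.startswith p.2.toList ['I', '-'] = true := by simpa using hI
      have hstep : stepV (summary, o, prev) p = (summary, o, p) := by simp [stepV, hIc]
      rw [hstep, ih]
      cases o with
      | none => rw [goB, hB]; simp
      | some b => rw [show takeIRun (p :: rest) prev = takeIRun rest p by simp [takeIRun, hIc]]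
    · have hIc : PySem.Chars.startswith p.2.toList ['I', '-'] = false := by simpa using hI
      have htk : takeIRun (p :: rest) prev = (prev, p :: rest) := by simp [takeIRun, hIc]
      cases o with
      | none =>
        have hstep : stepV (summary, none, prev) p =
            (summary, if PySem.Str.startswith p.2 "B-" then some p.1.1 else none, p) := by
          simp [stepV, hIc]
        rw [hstep]
        by_cases hB : PySem.Str.startswith p.2 "B-" = true
        · rw [if_pos hB, ih, goB, hB]; simp
        · rw [if_neg hB, ih, goB]; simp [show PySem.Chars.startswith p.2.toList ['B', '-'] = false by simpa using hB]
      | some b =>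
        have hstep : stepV (summary, some b, prev) p =
            (summary ++ [mkChunk b prev.1.2 prev.2],
             if PySem.Str.startswith p.2 "B-" then some p.1.1 else none, p) := by
          simp [stepV, hIc]
        rw [hstep, htk]
        by_cases hB : PySem.Str.startswith p.2 "B-" = true
        · rw [if_pos hB, ih, goB, hB]; simp
        · rw [if_neg hB, ih, goB]
          simp [show PySem.Chars.startswith p.2.toList ['B', '-'] = false by simpa using hB]

theorem A_fold_noB (TR : List (Int × Int)) (L : List String) (L' : List String) (s : Int)
    (h : ∀ l ∈ L', PySem.Str.startswith l "B-" = false) :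
    (PySem.List.enumerate L' s).foldl (AStep TR L) ([], none) = ([], none) := by
  induction L' generalizing s with
  | nil => simp [PySem.List.enumerate_nil]
  | cons l rest ih =>
    rw [PySem.List.enumerate_cons]
    have hBc : PySem.Chars.startswith l.toList ['B', '-'] = false := by simpa using h l (by simp)
    by_cases hI : PySem.Str.startswith l "I-" = true
    · have hIc : PySem.Chars.startswith l.toList ['I', '-'] = true := by simpa using hI
      simpa [AStep, hIc] using ih (s + 1) (fun x hx => h x (by simp [hx]))
    · have hIc : PySem.Chars.startswith l.toList ['I', '-'] = false := by simpa using hI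
      simpa [AStep, hIc, hBc] using ih (s + 1) (fun x hx => h x (by simp [hx]))

theorem goB_noB (pairs : List ((Int × Int) × String))
    (h : ∀ p ∈ pairs, PySem.Str.startswith p.2 "B-" = false) : goB pairs = [] := by
  induction pairs with
  | nil => simp [goB]
  | cons p rest ih =>
    rw [goB]
    simp only [h p (by simp), Bool.not_false, if_pos]
    exact ih (fun q hq => h q (by simp [hq]))

-- ===== VERDICT (by name: the statement is the Claim_ definition above) =====
theorem merge_token_labels_by_bio_spec : Claim_equal_merge_token_labels_by_bio := by
  intro TR L _ hpre
  unfold Spec_merge_token_labels_by_bio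
  rcases hpre with hlen | hnoB
  · have h := bridge TR L L 0 [] none none ((0, 0), "") hlen (by simp) (by simp) trivial
    simpa [merge_token_labels_by_bio, finA, merge_token_labels_by_bio_alt,
      V_eq_goB] using h
  · have hA := A_fold_noB TR L L 0 hnoB
    have hB : goB (TR.zip L) = [] :=
      goB_noB _ (fun p hp => hnoB p.2 (List.of_mem_zip hp).2)
    simp [merge_token_labels_by_bio, hA, merge_token_labels_by_bio_alt, hB]
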